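-- pv_equiv track=rewrite | github.com/SamConti184/Hierarchical-Pointer-Memory-Network | Data_preprocessing.py | getMaxLineLengths
-- ===== SOURCE A (Python) =====
-- from typing import Tuple, List
--
-- def getMaxLineLengths(lines: List[str]) -> List[int]:
--     max_feature_len = max_target_len = max_dialogue_len = dialogue_len = 0
--     for line in lines:
--         #if the dialogue is not over
--         if(len(line) > 1):
--             #Updating the current dialogue length
--             dialogue_len += len(line.split())
--             #user and system lines always separated by a tabulation character
--             sub_lines = line.split("\t")
--             #Check the lenghts of all the sublines (user and system)
--             #and the length only of the target sublines (system repsonse)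
--             if(len(sub_lines) > 1): #check if not a dataset line
--                 target_len = len(sub_lines[1].split())
--                 if (target_len > max_target_len):
--                     max_target_len = target_len
--             #Technically even the current target can become part of the
--             #feature input later
--             features_lengths = [len(line.split()) for line in sub_lines]
--             if(max(features_lengths) > max_feature_len):
--                 max_feature_len = max(features_lengths)
--         else:
--             if (dialogue_len > max_dialogue_len):
--                 max_dialogue_len = dialogue_len
--             dialogue_len = 0
--     return [max_feature_len, max_target_len, max_dialogue_len]
-- ===== SOURCE B (Python) =====
-- from typing import List
--
-- def getMaxLineLengths(lines: List[str]) -> List[int]: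
--     # Partition into dialogue segments terminated by a separator line (len <= 1);
--     # a trailing unterminated segment is not counted (A never flushes it).
--     segs, cur = [], []
--     for line in lines:
--         if len(line) <= 1:
--             segs.append(cur)
--             cur = []
--         else:
--             cur.append(line)
--     max_dialogue_len = max((sum(len(l.split()) for l in seg) for seg in segs), default=0)
--     tab_split = [line.split("\t") for line in lines if len(line) > 1]
--     max_feature_len = max((len(p.split()) for parts in tab_split for p in parts), default=0)
--     max_target_len = max((len(parts[1].split()) for parts in tab_split if len(parts) > 1), default=0)
--     return [max_feature_len, max_target_len, max_dialogue_len]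
-- ===== Notes on version B (the rewrite author's own statement) =====
-- stated objective: alternative
-- what changed: A's single stateful loop carrying four running variables is replaced by a decomposition: partition the lines into separator-terminated dialogue segments (the trailing unterminated segment is dropped, matching A never flushing it) and compute max_dialogue_len as a max of segment word-count sums, while max_feature_len and max_target_len come from comprehension-style maxima over the tab-split non-separator lines.
import Mathlib
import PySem

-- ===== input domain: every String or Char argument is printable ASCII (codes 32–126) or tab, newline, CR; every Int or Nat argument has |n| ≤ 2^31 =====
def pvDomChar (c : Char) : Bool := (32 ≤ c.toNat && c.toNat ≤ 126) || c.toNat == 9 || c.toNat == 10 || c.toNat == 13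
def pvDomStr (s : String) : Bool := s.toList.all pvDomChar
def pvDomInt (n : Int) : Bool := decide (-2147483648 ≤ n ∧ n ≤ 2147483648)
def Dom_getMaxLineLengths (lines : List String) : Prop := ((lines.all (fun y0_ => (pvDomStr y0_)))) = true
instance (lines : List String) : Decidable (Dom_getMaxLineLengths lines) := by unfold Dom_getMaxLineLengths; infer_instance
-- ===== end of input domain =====

-- B restructures A's single stateful loop into a decomposition: partition the lines
-- into separator-terminated dialogue segments and take maxima over comprehension-style
-- passes (objective: simpler/alternative decomposition, same cost).

-- shared primitives: len(line.split()) and line.split("\t")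
def pvWC (s : String) : Int := ((PySem.Str.split₀ s).length : Int)
def pvTabSplit (s : String) : List String := (PySem.Str.split? s "\t").getD []

-- ===== PORT A =====
def pvStepA (st : Int × Int × Int × Int) (line : String) : Int × Int × Int × Int :=
  if 1 < PySem.Str.len line then
    let dl' := st.2.2.2 + pvWC line
    let subLines := pvTabSplit line
    let mt' := if 1 < subLines.length then
        let targetLen := pvWC (subLines.getD 1 "")   -- sub_lines[1], guarded by len > 1
        if st.2.1 < targetLen then targetLen else st.2.1
      else st.2.1
    let featuresLengths := subLines.map pvWC
    let m := (PySem.List.max? featuresLengths (fun x => x)).getD 0  -- max(...) of a nonempty list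
    let mf' := if st.1 < m then m else st.1
    (mf', mt', st.2.2.1, dl')
  else
    let md' := if st.2.2.1 < st.2.2.2 then st.2.2.2 else st.2.2.1
    (st.1, st.2.1, md', 0)

def getMaxLineLengths (lines : List String) : List Int :=
  let r := lines.foldl pvStepA (0, 0, 0, 0)
  [r.1, r.2.1, r.2.2.1]

-- ===== PORT B =====
def pvSegStep (st : List (List String) × List String) (line : String) :
    List (List String) × List String :=
  if PySem.Str.len line ≤ 1 then (st.1 ++ [st.2], []) else (st.1, st.2 ++ [line])

def pvSegSum (seg : List String) : Int := (seg.map pvWC).sum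

def getMaxLineLengths_alt (lines : List String) : List Int :=
  let segs := (lines.foldl pvSegStep ([], [])).1
  let maxDialogueLen := (segs.map pvSegSum).foldl max 0
  let tabSplit := (lines.filter (fun l => decide (1 < PySem.Str.len l))).map pvTabSplit
  let maxFeatureLen := ((tabSplit.flatMap (fun ps => ps)).map pvWC).foldl max 0
  let maxTargetLen := ((tabSplit.filter (fun ps => decide (1 < ps.length))).map
      (fun ps => pvWC (ps.getD 1 ""))).foldl max 0
  [maxFeatureLen, maxTargetLen, maxDialogueLen]

-- ===== PRECONDITION & SPEC =====
def Spec_getMaxLineLengths (lines : List String) (out : List Int) : Prop := out = getMaxLineLengths_alt lines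
instance (lines : List String) (out : List Int) : Decidable (Spec_getMaxLineLengths lines out) := by unfold Spec_getMaxLineLengths; infer_instance

-- ===== CLAIM (what is proved, stated in full; the proofs are below) =====
def Claim_equal_getMaxLineLengths : Prop := ∀ (lines : List String), Dom_getMaxLineLengths lines → Spec_getMaxLineLengths lines (getMaxLineLengths lines)

-- ===== LEMMAS AND PROOFS =====

-- completed dialogue segments and the trailing unterminated lines, by structural recursion
def pvSegsRec : List String → List (List String) × List String
  | [] => ([], [])
  | l :: rest =>
    let r := pvSegsRec rest
    if PySem.Str.len l ≤ 1 then ([] :: r.1, r.2)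
    else match r.1 with
      | s :: ss => ((l :: s) :: ss, r.2)
      | [] => ([], l :: r.2)

lemma pvGo_ne_nil (sep : List Char) : ∀ (fuel : Nat) (l cur : List Char) (acc : List (List Char)),
    PySem.Chars.splitOn.go sep fuel l cur acc ≠ [] := by
  intro fuel
  induction fuel with
  | zero => intro l cur acc; simp [PySem.Chars.splitOn.go]
  | succ n ih =>
    intro l cur acc
    cases l with
    | nil => simp [PySem.Chars.splitOn.go]
    | cons c rest =>
      rw [PySem.Chars.splitOn.go]
      split_ifs with h
      · exact ih _ _ _
      · exact ih _ _ _

lemma pvFoldl_max_comm (l : List Int) (a : Int) : ∀ x, l.foldl max (max a x) = max a (l.foldl max x) := by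
  induction l with
  | nil => intro x; rfl
  | cons c cs ih => intro x; simp only [List.foldl_cons, max_assoc]; exact ih _

lemma pvTabSplit_ne_nil (s : String) : pvTabSplit s ≠ [] := by
  have h9 : (String.toList "\t") = ['\t'] := by decide
  simp only [pvTabSplit, PySem.Str.split?, PySem.Chars.split?, h9, PySem.Chars.splitOn]
  simp only [List.isEmpty_cons, Bool.false_eq_true, if_false, Option.map_some, Option.getD_some,
    ne_eq, List.map_eq_nil_iff]
  exact fun h => pvGo_ne_nil _ _ _ _ _ h

lemma pvLine_max (line : String) (mf : Int) :
    (if mf < (PySem.List.max? ((pvTabSplit line).map pvWC) (fun x => x)).getD 0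
     then (PySem.List.max? ((pvTabSplit line).map pvWC) (fun x => x)).getD 0 else mf)
      = (pvTabSplit line).foldl (fun a p => max a (pvWC p)) mf := by
  obtain ⟨x, t, hxt⟩ := List.exists_cons_of_ne_nil (pvTabSplit_ne_nil line)
  rw [hxt]
  simp only [List.map_cons, PySem.List.max?_id_cons, Option.getD_some, List.foldl_cons]
  rw [← List.foldl_map (f := pvWC) (g := max), pvFoldl_max_comm]
  split_ifs <;> omega

lemma pvSeg_foldl : ∀ (lines : List String) (segs : List (List String)) (cur : List String),
    (lines.foldl pvSegStep (segs, cur)).1 =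
      (match (pvSegsRec lines).1 with
       | [] => segs
       | s :: ss => segs ++ (cur ++ s) :: ss) := by
  intro lines
  induction lines with
  | nil => intro segs cur; simp [pvSegsRec]
  | cons l rest ih =>
    intro segs cur
    simp only [List.foldl_cons, pvSegStep, pvSegsRec]
    split_ifs with h
    · rw [ih]
      cases hr : (pvSegsRec rest).1 with
      | nil => simp
      | cons s ss => simp
    · rw [ih]
      cases hr : (pvSegsRec rest).1 with
      | nil => simp
      | cons s ss => simp

-- full characterisation of A's fold
lemma pvA_fold (lines : List String) : ∀ (mf mt md dl : Int),
    lines.foldl pvStepA (mf, mt, md, dl) =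
      ( (((lines.filter (fun l => decide (1 < PySem.Str.len l))).map pvTabSplit).flatMap
          (fun ps => ps)).foldl (fun a p => max a (pvWC p)) mf,
        (((lines.filter (fun l => decide (1 < PySem.Str.len l))).map pvTabSplit).filter
          (fun ps => decide (1 < ps.length))).foldl (fun a ps => max a (pvWC (ps.getD 1 ""))) mt,
        (match (pvSegsRec lines).1 with
         | [] => md
         | s :: ss => ss.foldl (fun a g => max a (pvSegSum g)) (max md (dl + pvSegSum s))),
        (match (pvSegsRec lines).1 with
         | [] => dl + pvSegSum (pvSegsRec lines).2
         | _ :: _ => pvSegSum (pvSegsRec lines).2) ) := by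
  induction lines with
  | nil => intro mf mt md dl; simp [pvSegsRec, pvSegSum]
  | cons l rest ih =>
    intro mf mt md dl
    by_cases h : 1 < PySem.Str.len l
    · -- non-separator line
      simp only [List.foldl_cons, pvStepA, if_pos h]
      rw [ih]
      have hsep : ¬ PySem.Str.len l ≤ 1 := by omega
      simp only [pvSegsRec, if_neg hsep, List.filter_cons, decide_eq_true_eq, if_pos h,
        List.map_cons, List.flatMap_cons, List.foldl_append, List.filter_cons]
      refine Prod.ext ?_ (Prod.ext ?_ (Prod.ext ?_ ?_))
      · -- max_feature component
        rw [pvLine_max]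
      · -- max_target component
        by_cases ht : 1 < (pvTabSplit l).length
        · simp only [if_pos ht, List.foldl_cons]
          have : (if mt < pvWC ((pvTabSplit l).getD 1 "") then pvWC ((pvTabSplit l).getD 1 "") else mt)
              = max mt (pvWC ((pvTabSplit l).getD 1 "")) := by omega
          rw [this]
        · simp only [if_neg ht]
      · -- max_dialogue component
        cases hr : (pvSegsRec rest).1 with
        | nil => simp
        | cons s ss =>
          simp only []
          have : pvSegSum (l :: s) = pvWC l + pvSegSum s := by
            simp [pvSegSum]
          rw [this]
          ring_nf
      · -- dialogue_len component
        cases hr : (pvSegsRec rest).1 with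
        | nil =>
          simp only [pvSegSum, List.map_cons, List.sum_cons]
          ring
        | cons s ss => simp
    · -- separator line
      have hsep : PySem.Str.len l ≤ 1 := by omega
      simp only [List.foldl_cons, pvStepA, if_neg h]
      rw [ih]
      simp only [pvSegsRec, if_pos hsep, List.filter_cons, decide_eq_true_eq, if_neg h]
      refine Prod.ext rfl (Prod.ext rfl (Prod.ext ?_ ?_))
      · -- max_dialogue component
        have hmd : (if md < dl then dl else md) = max md dl := by omega
        cases hr : (pvSegsRec rest).1 with
        | nil => simp [hmd, pvSegSum]
        | cons s ss => simp [hmd, pvSegSum, List.foldl_cons]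
      · -- dialogue_len component
        cases hr : (pvSegsRec rest).1 with
        | nil => simp
        | cons s ss => simp

-- ===== VERDICT (by name: the statement is the Claim_ definition above) =====
theorem getMaxLineLengths_spec : Claim_equal_getMaxLineLengths := by
  intro lines _
  show getMaxLineLengths lines = getMaxLineLengths_alt lines
  simp only [getMaxLineLengths, getMaxLineLengths_alt, pvA_fold, pvSeg_foldl]
  cases hr : (pvSegsRec lines).1 with
  | nil => simp only [List.foldl_map, List.foldl_nil]
  | cons s ss =>
      simp only [List.foldl_map, List.nil_append, List.foldl_cons, zero_add]
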